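-- pv_equiv track=rewrite | github.com/kkr010128/codebert | problem156/problem156_1.py | calc
-- ===== SOURCE A (Python) =====
-- def calc(X):
--     A = 1
--     B = 1
--     if X == 0:
--         return A,B
--     else:
--         l_bound = 1
--         h_bound = 200
--         for i in range(l_bound,h_bound):
--             for j in range(0,i+1):
--                 if i ** 5 - j ** 5 == X:
--                     A = i
--                     B = j
--                     return A,B
--                 if i ** 5 + j ** 5 == X:
--                     A = i
--                     B = -j
--                     return A,B
-- ===== SOURCE B (Python) =====
-- def _fifth_root(t, lo, hi):
--     # exact integer fifth root: the j in [lo, hi] with j**5 == t, else None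
--     while lo <= hi:
--         mid = lo + (hi - lo) // 2
--         m5 = mid ** 5
--         if m5 == t:
--             return mid
--         if m5 < t:
--             lo = mid + 1
--         else:
--             hi = mid - 1
--     return None
--
--
-- def calc(X):
--     if X == 0:
--         return 1, 1
--     for i in range(1, 200):
--         t = i ** 5 - X
--         if t >= 0:
--             j = _fifth_root(t, 0, i)
--             if j is not None:
--                 return i, j
--         else:
--             j = _fifth_root(-t, 0, i)
--             if j is not None:
--                 return i, -j
-- ===== Notes on version B (the rewrite author's own statement) =====
-- stated objective: faster
-- what changed: Replaces the inner linear scan over j in [0,i] by an exact integer fifth root computed with binary search (at most one of i^5-X / X-i^5 can be a nonnegative fifth power when X!=0, so the scan-order tie-break is preserved automatically).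
import Mathlib
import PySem

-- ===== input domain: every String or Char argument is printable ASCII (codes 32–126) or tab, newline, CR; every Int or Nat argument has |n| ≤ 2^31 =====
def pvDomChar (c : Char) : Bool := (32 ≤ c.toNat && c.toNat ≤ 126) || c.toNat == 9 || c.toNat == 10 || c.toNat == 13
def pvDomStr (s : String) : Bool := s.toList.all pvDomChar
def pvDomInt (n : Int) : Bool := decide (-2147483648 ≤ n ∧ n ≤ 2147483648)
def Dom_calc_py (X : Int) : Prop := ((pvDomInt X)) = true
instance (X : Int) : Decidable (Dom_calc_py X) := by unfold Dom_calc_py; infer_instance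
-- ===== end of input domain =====

-- B replaces A's inner linear scan over j by an exact integer-fifth-root binary search.

-- ===== PORT A =====
-- each Python for-loop with an early return becomes a first-some scan (findSome?) over the same range
def calc_py (X : Int) : Option (Int × Int) :=
  if X = 0 then some (1, 1)
  else
    (PySem.List.pyRange 1 200 1).findSome? (fun i =>
      (PySem.List.pyRange 0 (i + 1) 1).findSome? (fun j =>
        if i ^ 5 - j ^ 5 = X then some (i, j)
        else if i ^ 5 + j ^ 5 = X then some (i, -j)
        else none))

-- ===== PORT B =====
-- used by the termination argument of fifthRoot (cited in decreasing_by)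
theorem fdiv2_bounds {a : Int} (h : 0 ≤ a) : 0 ≤ a.fdiv 2 ∧ a.fdiv 2 ≤ a :=
  ⟨Int.fdiv_nonneg h (by norm_num), Int.fdiv_le_self (b := 2) h⟩

-- Source B's _fifth_root while-loop; terminates because [lo, hi] shrinks each round
def fifthRoot (t lo hi : Int) : Option Int :=
  if h : lo ≤ hi then
    let mid := lo + PySem.Int.floordiv (hi - lo) 2
    if mid ^ 5 = t then some mid
    else if mid ^ 5 < t then fifthRoot t (mid + 1) hi
    else fifthRoot t lo (mid - 1)
  else none
termination_by (hi - lo + 1).toNat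
decreasing_by
  all_goals
    simp only [PySem.Int.floordiv]
    obtain ⟨h1, h2⟩ := fdiv2_bounds (a := hi - lo) (by omega)
    omega

def calc_py_alt (X : Int) : Option (Int × Int) :=
  if X = 0 then some (1, 1)
  else
    (PySem.List.pyRange 1 200 1).findSome? (fun i =>
      let t := i ^ 5 - X
      if 0 ≤ t then
        match fifthRoot t 0 i with
        | some j => some (i, j)
        | none => none
      else
        match fifthRoot (-t) 0 i with
        | some j => some (i, -j)
        | none => none)

-- ===== PRECONDITION & SPEC =====
def Spec_calc_py (X : Int) (out : Option (Int × Int)) : Prop := out = calc_py_alt X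
instance (X : Int) (out : Option (Int × Int)) : Decidable (Spec_calc_py X out) := by unfold Spec_calc_py; infer_instance

-- ===== CLAIM (what is proved, stated in full; the proofs are below) =====
def Claim_equal_calc_py : Prop := ∀ (X : Int), Dom_calc_py X → Spec_calc_py X (calc_py X)

-- ===== LEMMAS AND PROOFS =====

-- fifth powers are strictly monotone, hence injective, on the nonnegative integers
theorem pow5_lt_pow5 {a b : Int} (ha : 0 ≤ a) (hab : a < b) : a ^ 5 < b ^ 5 :=
  pow_lt_pow_left₀ hab ha (by norm_num)

theorem pow5_inj {a b : Int} (ha : 0 ≤ a) (hb : 0 ≤ b) (h : a ^ 5 = b ^ 5) : a = b := by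
  rcases lt_trichotomy a b with hlt | heq | hgt
  · exact absurd h (ne_of_lt (pow5_lt_pow5 ha hlt))
  · exact heq
  · exact absurd h.symm (ne_of_lt (pow5_lt_pow5 hb hgt))

-- soundness of the binary search
theorem fifthRoot_sound {t lo hi j : Int} (h : fifthRoot t lo hi = some j) :
    lo ≤ j ∧ j ≤ hi ∧ j ^ 5 = t := by
  fun_induction fifthRoot t lo hi with
  | case1 lo hi hle mid heq =>
    have hm : lo ≤ mid ∧ mid ≤ hi := by
      obtain ⟨h1, h2⟩ := fdiv2_bounds (a := hi - lo) (by omega)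
      simp only [mid, PySem.Int.floordiv]
      omega
    simp only [Option.some.injEq] at h
    subst h
    exact ⟨hm.1, hm.2, heq⟩
  | case2 lo hi hle mid hne hlt ih =>
    obtain ⟨h1, h2, h3⟩ := ih h
    have hm : lo ≤ mid := by
      obtain ⟨hd, _⟩ := fdiv2_bounds (a := hi - lo) (by omega)
      simp only [mid, PySem.Int.floordiv]
      omega
    exact ⟨by omega, h2, h3⟩
  | case3 lo hi hle mid hne hge ih =>
    obtain ⟨h1, h2, h3⟩ := ih h
    have hm : mid ≤ hi := by
      obtain ⟨_, hd⟩ := fdiv2_bounds (a := hi - lo) (by omega)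
      simp only [mid, PySem.Int.floordiv]
      omega
    exact ⟨h1, by omega, h3⟩
  | case4 lo hi hgt => simp at h

-- completeness of the binary search (on a nonnegative interval)
theorem fifthRoot_complete {t lo hi j : Int} (hlo : 0 ≤ lo) (h1 : lo ≤ j) (h2 : j ≤ hi)
    (h3 : j ^ 5 = t) : fifthRoot t lo hi = some j := by
  fun_induction fifthRoot t lo hi with
  | case1 lo hi hle mid heq =>
    have hm : lo ≤ mid := by
      obtain ⟨hd, _⟩ := fdiv2_bounds (a := hi - lo) (by omega)
      simp only [mid, PySem.Int.floordiv]
      omega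
    have : mid = j := pow5_inj (by omega) (by omega) (heq.trans h3.symm)
    simp [this]
  | case2 lo hi hle mid hne hlt ih =>
    have hm : lo ≤ mid := by
      obtain ⟨hd, _⟩ := fdiv2_bounds (a := hi - lo) (by omega)
      simp only [mid, PySem.Int.floordiv]
      omega
    have hj : mid < j := by
      by_contra hc
      rcases eq_or_lt_of_le (not_lt.mp hc) with he | hl
      · exact hne (by rw [← he]; exact h3)
      · have hp := pow5_lt_pow5 (show (0:Int) ≤ j by omega) hl
        omega
    exact ih (by omega) (by omega) h2
  | case3 lo hi hle mid hne hge ih =>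
    have hm : 0 ≤ mid := by
      obtain ⟨hd, _⟩ := fdiv2_bounds (a := hi - lo) (by omega)
      simp only [mid, PySem.Int.floordiv]
      omega
    have hj : j < mid := by
      by_contra hc
      rcases eq_or_lt_of_le (not_lt.mp hc) with he | hl
      · exact hne (by rw [he]; exact h3)
      · have hp := pow5_lt_pow5 hm hl
        omega
    exact ih hlo h1 (by omega)
  | case4 lo hi hgt => omega

-- findSome? over an integer range: congruence, all-none, and first-hit
theorem findSome?_congr_mem {α β : Type} {l : List α} {f g : α → Option β}
    (h : ∀ x ∈ l, f x = g x) : l.findSome? f = l.findSome? g := by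
  induction l with
  | nil => rfl
  | cons a l ih =>
    simp only [List.findSome?_cons, h a (by simp)]
    cases g a with
    | some v => rfl
    | none => exact ih (fun x hx => h x (by simp [hx]))

theorem findSome?_pyRange_none {α : Type} (f : Int → Option α) (a b : Int)
    (h : ∀ j, a ≤ j → j < b → f j = none) :
    (PySem.List.pyRange a b 1).findSome? f = none := by
  rw [List.findSome?_eq_none_iff]
  intro x hx
  rw [PySem.List.mem_pyRange_one] at hx
  simp [h x hx.1 hx.2]

theorem findSome?_pyRange_first {α : Type} (f : Int → Option α) (a b j0 : Int) (v : α)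
    (hj1 : a ≤ j0) (hj2 : j0 < b) (hnone : ∀ j, a ≤ j → j < j0 → f j = none)
    (hhit : f j0 = some v) :
    (PySem.List.pyRange a b 1).findSome? f = some v := by
  rw [PySem.List.pyRange_one_append a j0 b hj1 (by omega), List.findSome?_append,
      findSome?_pyRange_none f a j0 hnone]
  rw [PySem.List.pyRange_one_cons (by omega : j0 < b)]
  simp [hhit]

-- the per-i bodies of the two scans agree (for X ≠ 0, 1 ≤ i)
theorem body_eq (X i : Int) (_hX : X ≠ 0) (_hi : 1 ≤ i) :
    (PySem.List.pyRange 0 (i + 1) 1).findSome? (fun j =>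
        if i ^ 5 - j ^ 5 = X then some (i, j)
        else if i ^ 5 + j ^ 5 = X then some (i, -j)
        else none) =
    (let t := i ^ 5 - X
     if 0 ≤ t then
       match fifthRoot t 0 i with
       | some j => some (i, j)
       | none => none
     else
       match fifthRoot (-t) 0 i with
       | some j => some (i, -j)
       | none => none) := by
  set t := i ^ 5 - X with ht
  by_cases h0 : 0 ≤ t
  · simp only [if_pos h0]
    cases hf : fifthRoot t 0 i with
    | some j0 =>
      obtain ⟨hj1, hj2, hj3⟩ := fifthRoot_sound hf
      apply findSome?_pyRange_first _ _ _ j0 _ hj1 (by omega)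
      · intro j hja hjb
        have hdiff : i ^ 5 - j ^ 5 ≠ X := by
          intro he
          have hjt : j ^ 5 = t := by omega
          exact absurd (pow5_inj hja hj1 (hjt.trans hj3.symm)) (by omega)
        have hsum : i ^ 5 + j ^ 5 ≠ X := by
          intro he
          have hj5 : 0 ≤ j ^ 5 := pow_nonneg hja 5
          have hjz : j ^ 5 = 0 := by omega
          have ht0 : t = 0 := by omega
          have : j0 = 0 := pow5_inj hj1 le_rfl (by rw [hj3, ht0]; norm_num)
          omega
        simp [hdiff, hsum]
      · simp [show i ^ 5 - j0 ^ 5 = X by omega]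
    | none =>
      apply findSome?_pyRange_none
      intro j hja hjb
      have hdiff : i ^ 5 - j ^ 5 ≠ X := by
        intro he
        have hjt : j ^ 5 = t := by omega
        have := fifthRoot_complete le_rfl hja (by omega : j ≤ i) hjt
        rw [hf] at this
        simp at this
      have hsum : i ^ 5 + j ^ 5 ≠ X := by
        intro he
        have hj5 : 0 ≤ j ^ 5 := pow_nonneg hja 5
        have hjt : j ^ 5 = t := by omega
        have := fifthRoot_complete le_rfl hja (by omega : j ≤ i) hjt
        rw [hf] at this
        simp at this
      simp [hdiff, hsum]
  · simp only [if_neg h0]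
    cases hf : fifthRoot (-t) 0 i with
    | some j0 =>
      obtain ⟨hj1, hj2, hj3⟩ := fifthRoot_sound hf
      apply findSome?_pyRange_first _ _ _ j0 _ hj1 (by omega)
      · intro j hja hjb
        have hj5 : 0 ≤ j ^ 5 := pow_nonneg hja 5
        have hdiff : i ^ 5 - j ^ 5 ≠ X := by intro he; omega
        have hsum : i ^ 5 + j ^ 5 ≠ X := by
          intro he
          have hjt : j ^ 5 = -t := by omega
          exact absurd (pow5_inj hja hj1 (hjt.trans hj3.symm)) (by omega)
        simp [hdiff, hsum]
      · have hj5 : 0 ≤ j0 ^ 5 := pow_nonneg hj1 5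
        simp [show ¬ (i ^ 5 - j0 ^ 5 = X) by omega, show i ^ 5 + j0 ^ 5 = X by omega]
    | none =>
      apply findSome?_pyRange_none
      intro j hja hjb
      have hj5 : 0 ≤ j ^ 5 := pow_nonneg hja 5
      have hdiff : i ^ 5 - j ^ 5 ≠ X := by intro he; omega
      have hsum : i ^ 5 + j ^ 5 ≠ X := by
        intro he
        have := fifthRoot_complete (t := -t) le_rfl hja (by omega : j ≤ i) (by omega)
        rw [hf] at this
        simp at this
      simp [hdiff, hsum]

-- ===== VERDICT (by name: the statement is the Claim_ definition above) =====
theorem calc_py_spec : Claim_equal_calc_py := by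
  intro X _
  unfold Spec_calc_py calc_py calc_py_alt
  by_cases hX : X = 0
  · simp [hX]
  · simp only [if_neg hX]
    exact findSome?_congr_mem (fun i hi =>
      body_eq X i hX (by
        rw [PySem.List.mem_pyRange_one] at hi
        omega))
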